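-- pv_equiv track=rewrite | github.com/MrBrantCode/unitest_baseline | mut_generate/mist_train_taco/taco_6539/solution.py | calculate_minimum_silk_area_ways
-- ===== SOURCE A (Python) =====
-- from itertools import combinations
-- from functools import reduce
--
-- def stain_combos(n, k):
--     p = 1000000007
--     if k < 0:
--         return 0
--     out = 1
--     for i in range(n - k + 1, n + 1):
--         out = out * i % p
--     denom = 1
--     for i in range(1, k + 1):
--         denom = denom * i % p
--     denom = pow(denom, p - 2, p)
--     return out * denom % p
--
-- def calculate_minimum_silk_area_ways(n, k, stains):
--     min_x = min(stain[0] for stain in stains)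
--     max_x = max(stain[0] for stain in stains)
--     min_y = min(stain[1] for stain in stains)
--     max_y = max(stain[1] for stain in stains)
--
--     top = {stain for stain in stains if stain[0] == min_x}
--     bot = {stain for stain in stains if stain[0] == max_x}
--     left = {stain for stain in stains if stain[1] == min_y}
--     right = {stain for stain in stains if stain[1] == max_y}
--
--     out = 0
--     for i in range(1, 5):
--         for sides in combinations([top, bot, left, right], i):
--             removed = reduce(lambda x, y: x.union(y), sides)
--             length = len(removed)
--             out += (-1) ** (i + 1) * stain_combos(len(stains) - length, k - length)
--
--     return out % 1000000007
-- ===== SOURCE B (Python) =====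
-- def stain_combos(n, k):
--     p = 1000000007
--     if k < 0:
--         return 0
--     out = 1
--     for i in range(n - k + 1, n + 1):
--         out = out * i % p
--     denom = 1
--     for i in range(1, k + 1):
--         denom = denom * i % p
--     denom = pow(denom, p - 2, p)
--     return out * denom % p
--
-- def calculate_minimum_silk_area_ways(n, k, stains):
--     # one pass over the stains for all four extrema
--     x0, y0 = stains[0]
--     min_x = max_x = x0
--     min_y = max_y = y0
--     for x, y in stains[1:]:
--         if x < min_x: min_x = x
--         if x > max_x: max_x = x
--         if y < min_y: min_y = y
--         if y > max_y: max_y = y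
--     sides = [{s for s in stains if s[0] == min_x},
--              {s for s in stains if s[0] == max_x},
--              {s for s in stains if s[1] == min_y},
--              {s for s in stains if s[1] == max_y}]
--     total = len(stains)
--
--     # alternating-difference recursion over the four sides: signed(i, chosen) =
--     # sum over all subsets S of sides[i:] of (-1)^|S| * C(total-|chosen ∪ S|, k-|chosen ∪ S|)
--     def signed(i, chosen):
--         if i == 4:
--             m = len(chosen)
--             return stain_combos(total - m, k - m)
--         return signed(i + 1, chosen) - signed(i + 1, chosen | sides[i])
--
--     return (stain_combos(total, k) - signed(0, set())) % 1000000007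
-- ===== Notes on version B (the rewrite author's own statement) =====
-- stated objective: alternative
-- what changed: Replaces A's iterative enumeration of itertools.combinations with reduce-union and explicit (-1)^(i+1) signs by a depth-4 include/exclude recursion that threads one growing union set and uses subtraction for the alternating signs, returning C(N,k) minus the recursion's total; the four extrema are computed in one pass instead of four generator scans.
import Mathlib
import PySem

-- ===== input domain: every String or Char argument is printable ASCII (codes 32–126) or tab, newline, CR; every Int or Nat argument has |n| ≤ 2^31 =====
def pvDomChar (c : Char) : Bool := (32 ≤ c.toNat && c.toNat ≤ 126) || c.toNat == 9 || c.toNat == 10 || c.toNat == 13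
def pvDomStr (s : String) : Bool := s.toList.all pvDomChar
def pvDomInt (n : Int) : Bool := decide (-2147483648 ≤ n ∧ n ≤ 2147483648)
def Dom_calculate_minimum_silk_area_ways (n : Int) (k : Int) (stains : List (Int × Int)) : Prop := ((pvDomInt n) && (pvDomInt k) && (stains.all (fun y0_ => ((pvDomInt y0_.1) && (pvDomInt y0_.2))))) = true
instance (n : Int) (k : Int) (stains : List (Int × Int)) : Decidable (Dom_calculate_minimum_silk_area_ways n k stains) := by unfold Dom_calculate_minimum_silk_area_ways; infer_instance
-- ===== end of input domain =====

-- B replaces A's iterative enumeration of itertools.combinations (reduce-union per subset, explicit (-1)^(i+1)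
-- signs) by a depth-4 include/exclude recursion threading one growing union set, with subtraction supplying the
-- alternating signs (answer = C(N,k) - recursion total), and computes the four extrema in one pass (alternative
-- decomposition, same cost). Equivalence is proved for the return value on non-empty stain lists.

-- ===== PORT A =====
-- hand port of Python's three-argument pow(b, e, m) for e ≥ 0, m > 0, by binary exponentiation: exact
-- (returns b^e mod m with 0 ≤ result < m); used instead of PySem.Int.powMod, whose evaluation is linear
-- in the exponent and cannot be run at e = 10^9+5
def pvPowMod (b : Int) (e : Nat) (m : Int) : Int :=
  if _h : e = 0 then PySem.Int.mod 1 m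
  else
    let hlf := pvPowMod b (e / 2) m
    if e % 2 = 0 then PySem.Int.mod (hlf * hlf) m
    else PySem.Int.mod (hlf * hlf * PySem.Int.mod b m) m
termination_by e
decreasing_by omega

-- shared helper: stain_combos, identical in Source A and Source B
def stainCombos (n : Int) (k : Int) : Int :=
  if k < 0 then 0
  else
    let out := (PySem.List.pyRange (n - k + 1) (n + 1) 1).foldl (fun out i => PySem.Int.mod (out * i) 1000000007) 1
    let denom := (PySem.List.pyRange 1 (k + 1) 1).foldl (fun denom i => PySem.Int.mod (denom * i) 1000000007) 1
    let denom2 := pvPowMod denom (((1000000007 : Int) - 2).toNat) 1000000007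
    PySem.Int.mod (out * denom2) 1000000007

def calculate_minimum_silk_area_ways (n : Int) (k : Int) (stains : List (Int × Int)) : Int :=
  -- min()/max() of an empty generator raise ValueError: Pre_ requires stains ≠ [], so .getD 0 is never reached
  let min_x := (PySem.List.min? (stains.map (fun stain => stain.1)) (fun x => x)).getD 0
  let max_x := (PySem.List.max? (stains.map (fun stain => stain.1)) (fun x => x)).getD 0
  let min_y := (PySem.List.min? (stains.map (fun stain => stain.2)) (fun x => x)).getD 0
  let max_y := (PySem.List.max? (stains.map (fun stain => stain.2)) (fun x => x)).getD 0
  let top := PySem.Set.ofList (stains.filter (fun stain => stain.1 == min_x))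
  let bot := PySem.Set.ofList (stains.filter (fun stain => stain.1 == max_x))
  let left := PySem.Set.ofList (stains.filter (fun stain => stain.2 == min_y))
  let right := PySem.Set.ofList (stains.filter (fun stain => stain.2 == max_y))
  let out := (PySem.List.pyRange 1 5 1).foldl (fun out i =>
      (PySem.List.combinations [top, bot, left, right] i.toNat).foldl (fun out sides =>
        -- reduce(union, sides) = fold union over the tail starting from the head; sides ≠ [] since i ≥ 1
        let removed := sides.tail.foldl PySem.Set.union (sides.headD [])
        let length : Int := removed.length
        out + (-1) ^ (i + 1).toNat * stainCombos (stains.length - length) (k - length)) out) 0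
  PySem.Int.mod out 1000000007

-- ===== PORT B =====
-- B's inner recursion signed(i, chosen): sum over all subsets S of the remaining sides of
-- (-1)^|S| * stain_combos(total - |chosen ∪ S|, k - |chosen ∪ S|), by include/exclude with subtraction
def pvSigned (total : Int) (k : Int) (sides : List (PySem.Set (Int × Int))) (chosen : PySem.Set (Int × Int)) : Int :=
  match sides with
  | [] => stainCombos (total - (chosen.length : Int)) (k - (chosen.length : Int))
  | s :: rest => pvSigned total k rest chosen - pvSigned total k rest (PySem.Set.union chosen s)

def calculate_minimum_silk_area_ways_alt (n : Int) (k : Int) (stains : List (Int × Int)) : Int :=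
  match stains with
  | [] => 0  -- Python B's stains[0] raises IndexError here; excluded by Pre_
  | (x0, y0) :: rest =>
    let e := rest.foldl (fun (e : Int × Int × Int × Int) (s : Int × Int) =>
        (if s.1 < e.1 then s.1 else e.1,
         if s.1 > e.2.1 then s.1 else e.2.1,
         if s.2 < e.2.2.1 then s.2 else e.2.2.1,
         if s.2 > e.2.2.2 then s.2 else e.2.2.2)) (x0, x0, y0, y0)
    let sides := [PySem.Set.ofList (((x0, y0) :: rest).filter (fun s => s.1 == e.1)),
                  PySem.Set.ofList (((x0, y0) :: rest).filter (fun s => s.1 == e.2.1)),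
                  PySem.Set.ofList (((x0, y0) :: rest).filter (fun s => s.2 == e.2.2.1)),
                  PySem.Set.ofList (((x0, y0) :: rest).filter (fun s => s.2 == e.2.2.2))]
    let total : Int := ((x0, y0) :: rest).length
    PySem.Int.mod (stainCombos total k - pvSigned total k sides []) 1000000007

-- ===== PRECONDITION & SPEC =====
-- Pre_ excludes only the empty stain list, on which A's min() raises ValueError (and B's stains[0] IndexError).
def Pre_calculate_minimum_silk_area_ways (n : Int) (k : Int) (stains : List (Int × Int)) : Prop := stains ≠ []
instance (n : Int) (k : Int) (stains : List (Int × Int)) : Decidable (Pre_calculate_minimum_silk_area_ways n k stains) := by unfold Pre_calculate_minimum_silk_area_ways; infer_instance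
def pvWitness_calculate_minimum_silk_area_ways : Int × Int × (List (Int × Int)) := (4, 2, [(0, 0), (0, 3), (2, 1), (2, 1)])
def Spec_calculate_minimum_silk_area_ways (n : Int) (k : Int) (stains : List (Int × Int)) (out : Int) : Prop := out = calculate_minimum_silk_area_ways_alt n k stains
instance (n : Int) (k : Int) (stains : List (Int × Int)) (out : Int) : Decidable (Spec_calculate_minimum_silk_area_ways n k stains out) := by unfold Spec_calculate_minimum_silk_area_ways; infer_instance

-- ===== CLAIM (what is proved, stated in full; the proofs are below) =====
def Claim_equal_calculate_minimum_silk_area_ways : Prop := ∀ (n : Int) (k : Int) (stains : List (Int × Int)), Dom_calculate_minimum_silk_area_ways n k stains → Pre_calculate_minimum_silk_area_ways n k stains → Spec_calculate_minimum_silk_area_ways n k stains (calculate_minimum_silk_area_ways n k stains)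

-- ===== LEMMAS AND PROOFS =====

lemma pvMinIf (a x : Int) : (if x < a then x else a) = min a x := by
  rcases le_or_gt a x with h | h
  · rw [if_neg (not_lt.mpr h), min_eq_left h]
  · rw [if_pos h, min_eq_right h.le]

lemma pvMaxIf (a x : Int) : (if x > a then x else a) = max a x := by
  rcases le_or_gt x a with h | h
  · rw [if_neg (not_lt.mpr h), max_eq_left h]
  · rw [if_pos h, max_eq_right h.le]

-- B's single extrema pass splits into four independent folds
lemma pvFoldExtrema (rest : List (Int × Int)) (a b c d : Int) :
    rest.foldl (fun (e : Int × Int × Int × Int) (s : Int × Int) =>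
        (if s.1 < e.1 then s.1 else e.1,
         if s.1 > e.2.1 then s.1 else e.2.1,
         if s.2 < e.2.2.1 then s.2 else e.2.2.1,
         if s.2 > e.2.2.2 then s.2 else e.2.2.2)) (a, b, c, d)
    = (rest.foldl (fun m s => min m s.1) a, rest.foldl (fun m s => max m s.1) b,
       rest.foldl (fun m s => min m s.2) c, rest.foldl (fun m s => max m s.2) d) := by
  induction rest generalizing a b c d with
  | nil => rfl
  | cons hd tl ih =>
    simp only [List.foldl_cons]
    rw [ih]
    simp only [pvMinIf, pvMaxIf]

lemma pvUnionNil {t : List (Int × Int)} (h : t.Nodup) : PySem.Set.union ([] : PySem.Set (Int × Int)) t = t := by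
  rw [PySem.Set.union, PySem.Set.update_nil_left, PySem.Set.ofList_eq_self_of_nodup t h]

-- ===== VERDICT (by name: the statement is the Claim_ definition above) =====
set_option maxHeartbeats 40000000 in
theorem calculate_minimum_silk_area_ways_spec : Claim_equal_calculate_minimum_silk_area_ways := by
  intro n k stains _ hpre
  unfold Spec_calculate_minimum_silk_area_ways
  match stains, hpre with
  | (x0, y0) :: rest, _ =>
  simp only [calculate_minimum_silk_area_ways, calculate_minimum_silk_area_ways_alt, pvFoldExtrema]
  have hmnx : (PySem.List.min? (((x0, y0) :: rest).map (fun stain => stain.1)) (fun x => x)).getD 0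
      = rest.foldl (fun m s => min m s.1) x0 := by
    rw [List.map_cons, PySem.List.min?_id_cons, Option.getD_some, List.foldl_map]
  have hmxx : (PySem.List.max? (((x0, y0) :: rest).map (fun stain => stain.1)) (fun x => x)).getD 0
      = rest.foldl (fun m s => max m s.1) x0 := by
    rw [List.map_cons, PySem.List.max?_id_cons, Option.getD_some, List.foldl_map]
  have hmny : (PySem.List.min? (((x0, y0) :: rest).map (fun stain => stain.2)) (fun x => x)).getD 0
      = rest.foldl (fun m s => min m s.2) y0 := by
    rw [List.map_cons, PySem.List.min?_id_cons, Option.getD_some, List.foldl_map]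
  have hmxy : (PySem.List.max? (((x0, y0) :: rest).map (fun stain => stain.2)) (fun x => x)).getD 0
      = rest.foldl (fun m s => max m s.2) y0 := by
    rw [List.map_cons, PySem.List.max?_id_cons, Option.getD_some, List.foldl_map]
  rw [hmnx, hmxx, hmny, hmxy]
  set mnx := rest.foldl (fun m s => min m s.1) x0 with hm1
  set mxx := rest.foldl (fun m s => max m s.1) x0 with hm2
  set mny := rest.foldl (fun m s => min m s.2) y0 with hm3
  set mxy := rest.foldl (fun m s => max m s.2) y0 with hm4
  set tS := PySem.Set.ofList (((x0, y0) :: rest).filter (fun s => s.1 == mnx)) with htS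
  set bS := PySem.Set.ofList (((x0, y0) :: rest).filter (fun s => s.1 == mxx)) with hbS
  set lS := PySem.Set.ofList (((x0, y0) :: rest).filter (fun s => s.2 == mny)) with hlS
  set rS := PySem.Set.ofList (((x0, y0) :: rest).filter (fun s => s.2 == mxy)) with hrS
  -- expand A's enumeration
  rw [show PySem.List.pyRange 1 5 1 = [1, 2, 3, 4] from by decide]
  simp only [List.foldl_cons, List.foldl_nil]
  simp only [show Int.toNat 1 = 1 from rfl, show Int.toNat 2 = 2 from rfl,
    show Int.toNat 3 = 3 from rfl, show Int.toNat 4 = 4 from rfl,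
    PySem.List.combinations_cons_succ, PySem.List.combinations_zero, PySem.List.combinations_nil_succ,
    List.map_cons, List.map_nil, List.nil_append, List.cons_append, List.append_nil,
    List.foldl_cons, List.foldl_nil, List.tail_cons, List.headD_cons]
  simp only [show ((1 : Int) + 1).toNat = 2 from rfl, show ((2 : Int) + 1).toNat = 3 from rfl,
    show ((3 : Int) + 1).toNat = 4 from rfl, show ((4 : Int) + 1).toNat = 5 from rfl,
    show ((-1 : Int)) ^ 2 = 1 from by norm_num, show ((-1 : Int)) ^ 3 = -1 from by norm_num,
    show ((-1 : Int)) ^ 4 = 1 from by norm_num, show ((-1 : Int)) ^ 5 = -1 from by norm_num,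
    one_mul, neg_one_mul]
  -- expand B's recursion
  simp only [pvSigned]
  have h0t : PySem.Set.union ([] : PySem.Set (Int × Int)) tS = tS :=
    pvUnionNil (htS ▸ PySem.Set.nodup_ofList _)
  have h0b : PySem.Set.union ([] : PySem.Set (Int × Int)) bS = bS :=
    pvUnionNil (hbS ▸ PySem.Set.nodup_ofList _)
  have h0l : PySem.Set.union ([] : PySem.Set (Int × Int)) lS = lS :=
    pvUnionNil (hlS ▸ PySem.Set.nodup_ofList _)
  have h0r : PySem.Set.union ([] : PySem.Set (Int × Int)) rS = rS :=
    pvUnionNil (hrS ▸ PySem.Set.nodup_ofList _)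
  rw [h0t, h0b, h0l, h0r]
  simp only [List.length_nil, Nat.cast_zero, sub_zero]
  congr 1
  ring
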